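-- pv_equiv track=rewrite | github.com/TobiasBak/fun_projects | Recap/imageModifier.py | _get_split_indexes
-- ===== SOURCE A (Python) =====
-- def _get_split_indexes(black_or_white_rows) -> list[list]:
--     split_indexes_pairs: list[list] = []
--     pair_start = 0
--     last_index = 0
--     for i in black_or_white_rows:
--
--         if i < last_index + 10:
--             last_index = i
--             continue
--
--         split_indexes_pairs.append([pair_start, last_index])
--         pair_start = i
--         last_index = i
--
--     split_indexes_pairs.append([pair_start, last_index])
--
--     return split_indexes_pairs
-- ===== SOURCE B (Python) =====
-- def _get_split_indexes(black_or_white_rows) -> list[list]: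
--     # Staged pipeline instead of a stateful scan:
--     # 1) prepend the anchor 0; 2) pair each element with its successor;
--     # 3) a "break" is an adjacent pair with gap >= 10;
--     # 4) group starts = 0 plus the right ends of breaks,
--     #    group ends = left ends of breaks plus the last element;
--     # 5) zip starts with ends.
--     xs = [0] + list(black_or_white_rows)
--     breaks = [(a, b) for a, b in zip(xs, xs[1:]) if b - a >= 10]
--     starts = [0] + [b for _, b in breaks]
--     ends = [a for a, _ in breaks] + [xs[-1]]
--     return [[s, e] for s, e in zip(starts, ends)]
-- ===== Notes on version B (the rewrite author's own statement) =====
-- stated objective: alternative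
-- what changed: A is a stateful single-pass fold carrying (pairs, pair_start, last_index); B is a staged pipeline: zip adjacent pairs of the anchor-prepended row list, filter the gap>=10 breaks, build the starts and ends lists from the break pairs, and zip them together.
import Mathlib
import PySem

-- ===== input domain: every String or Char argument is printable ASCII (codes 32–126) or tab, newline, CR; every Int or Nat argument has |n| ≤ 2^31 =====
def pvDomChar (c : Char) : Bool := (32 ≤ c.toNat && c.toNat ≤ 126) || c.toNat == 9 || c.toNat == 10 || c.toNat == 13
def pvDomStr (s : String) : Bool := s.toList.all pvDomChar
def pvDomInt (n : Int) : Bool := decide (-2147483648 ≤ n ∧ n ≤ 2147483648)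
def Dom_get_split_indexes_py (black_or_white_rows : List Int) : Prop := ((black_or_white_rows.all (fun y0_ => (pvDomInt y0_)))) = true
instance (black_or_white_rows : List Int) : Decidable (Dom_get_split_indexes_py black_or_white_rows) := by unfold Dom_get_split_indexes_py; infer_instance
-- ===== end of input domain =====

-- B replaces A's stateful fold by a staged pipeline (zip adjacent pairs, filter breaks,
-- assemble starts/ends, zip them); same O(n) cost, different algorithm ("alternative").

-- ===== PORT A =====
-- A's loop body: state is (split_indexes_pairs, pair_start, last_index)
def pvStepA (st : List (List Int) × Int × Int) (i : Int) : List (List Int) × Int × Int :=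
  if i < st.2.2 + 10 then (st.1, st.2.1, i)
  else (st.1 ++ [[st.2.1, st.2.2]], i, i)

def get_split_indexes_py (black_or_white_rows : List Int) : List (List Int) :=
  let s := black_or_white_rows.foldl pvStepA ([], 0, 0)
  s.1 ++ [[s.2.1, s.2.2]]

-- ===== PORT B =====
-- xs[1:] is ported as xs.drop 1 (exact: nonnegative slice start);
-- xs[-1] is ported as xs.getLastD 0 (exact here: xs starts with the anchor element, so it is never empty).
def get_split_indexes_py_alt (black_or_white_rows : List Int) : List (List Int) :=
  let xs : List Int := 0 :: black_or_white_rows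
  let breaks := (xs.zip (xs.drop 1)).filter (fun p => decide (10 ≤ p.2 - p.1))
  let starts := 0 :: breaks.map Prod.snd
  let ends := breaks.map Prod.fst ++ [xs.getLastD 0]
  (starts.zip ends).map (fun p => [p.1, p.2])

-- ===== PRECONDITION & SPEC =====
def Spec_get_split_indexes_py (black_or_white_rows : List Int) (out : List (List Int)) : Prop := out = get_split_indexes_py_alt black_or_white_rows
instance (black_or_white_rows : List Int) (out : List (List Int)) : Decidable (Spec_get_split_indexes_py black_or_white_rows out) := by unfold Spec_get_split_indexes_py; infer_instance

-- ===== CLAIM =====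
def Claim_equal_get_split_indexes_py : Prop := ∀ (black_or_white_rows : List Int), Dom_get_split_indexes_py black_or_white_rows → Spec_get_split_indexes_py black_or_white_rows (get_split_indexes_py black_or_white_rows)

-- ===== LEMMAS AND PROOFS =====

-- reference recursion bridging A's fold and B's pipeline
def pvG (ps prev : Int) : List Int → List (List Int)
  | [] => [[ps, prev]]
  | x :: r => if x < prev + 10 then pvG ps x r else [ps, prev] :: pvG x x r

theorem pvFold_eq_G : ∀ (rest : List Int) (acc : List (List Int)) (ps prev : Int),
    (let s := rest.foldl pvStepA (acc, ps, prev); s.1 ++ [[s.2.1, s.2.2]]) = acc ++ pvG ps prev rest := by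
  intro rest
  induction rest with
  | nil => intro acc ps prev; simp [pvG]
  | cons x r ih =>
      intro acc ps prev
      simp only [List.foldl_cons, pvStepA, pvG]
      split
      · exact ih acc ps x
      · rw [ih (acc ++ [[ps, prev]]) x x]
        simp

-- the staged-pipeline shape of B, with the anchor generalized
def pvPipe (ps prev : Int) (l : List Int) : List (List Int) :=
  let breaks := ((prev :: l).zip l).filter (fun p => decide (10 ≤ p.2 - p.1))
  ((ps :: breaks.map Prod.snd).zip (breaks.map Prod.fst ++ [(prev :: l).getLastD 0])).map
    (fun p => [p.1, p.2])

theorem pvG_eq_pipe : ∀ (l : List Int) (ps prev : Int), pvG ps prev l = pvPipe ps prev l := by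
  intro l
  induction l with
  | nil => intro ps prev; simp [pvG, pvPipe]
  | cons x r ih =>
      intro ps prev
      simp only [pvG, pvPipe]
      by_cases hc : x < prev + 10
      · rw [if_pos hc]
        have hb : ¬ (10 ≤ x - prev) := by omega
        rw [ih ps x]
        simp only [pvPipe, List.zip_cons_cons, List.filter_cons, decide_eq_true_eq, hb,
          if_false, List.getLastD_cons]
      · rw [if_neg hc]
        have hb : (10 ≤ x - prev) := by omega
        rw [ih x x]
        simp only [pvPipe, List.zip_cons_cons, List.filter_cons, decide_eq_true_eq, hb,
          if_true, List.map_cons, List.getLastD_cons, List.cons_append, List.zip_cons_cons,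
          List.map_cons]

-- ===== VERDICT =====
theorem get_split_indexes_py_spec : Claim_equal_get_split_indexes_py := by
  intro rows _
  show get_split_indexes_py rows = get_split_indexes_py_alt rows
  have h1 := pvFold_eq_G rows [] 0 0
  simp only [List.nil_append] at h1
  rw [get_split_indexes_py, get_split_indexes_py_alt, h1, pvG_eq_pipe rows 0 0]
  rfl
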